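-- pv_equiv track=rewrite | github.com/dpowellm/stratum-cli | stratum/rules/helpers.py | limit_evidence
-- ===== SOURCE A (Python) =====
-- def limit_evidence(evidence: list[str], max_items: int = 4) -> list[str]:
--     """Keep the most specific evidence items.
--
--     Priority: file paths with line numbers > file paths > metadata.
--     """
--     if len(evidence) <= max_items:
--         return evidence
--     with_lines = [e for e in evidence if ":" in e and not e.endswith(":0")]
--     # File paths (contain / or \) without line numbers
--     file_paths = [
--         e for e in evidence
--         if e not in with_lines and ("/" in e or "\\" in e)
--         and not e.startswith("Crew:") and not e.startswith("Shared")
--         and not e.startswith("Downstream:")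
--     ]
--     metadata = [e for e in evidence if e not in with_lines and e not in file_paths]
--     return (with_lines + file_paths + metadata)[:max_items]
-- ===== SOURCE B (Python) =====
-- def limit_evidence(evidence: list[str], max_items: int = 4) -> list[str]:
--     """Keep the most specific evidence items: one stable sort by priority bucket, then truncate."""
--     if len(evidence) <= max_items:
--         return evidence
--
--     def priority(e: str) -> int:
--         if ":" in e and not e.endswith(":0"):
--             return 0
--         if ("/" in e or "\\" in e) and not e.startswith("Crew:") \
--                 and not e.startswith("Shared") and not e.startswith("Downstream:"):
--             return 1
--         return 2
--
--     return sorted(evidence, key=priority)[:max_items]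
-- ===== Notes on version B (the rewrite author's own statement) =====
-- stated objective: simpler
-- what changed: A builds three bucket lists with list-comprehensions whose later passes re-scan the earlier buckets via 'e not in ...' membership tests, then concatenates and slices; B computes a 0/1/2 priority key per element and does one stable sort by that key followed by the same slice, so the membership scans disappear.
import Mathlib
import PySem

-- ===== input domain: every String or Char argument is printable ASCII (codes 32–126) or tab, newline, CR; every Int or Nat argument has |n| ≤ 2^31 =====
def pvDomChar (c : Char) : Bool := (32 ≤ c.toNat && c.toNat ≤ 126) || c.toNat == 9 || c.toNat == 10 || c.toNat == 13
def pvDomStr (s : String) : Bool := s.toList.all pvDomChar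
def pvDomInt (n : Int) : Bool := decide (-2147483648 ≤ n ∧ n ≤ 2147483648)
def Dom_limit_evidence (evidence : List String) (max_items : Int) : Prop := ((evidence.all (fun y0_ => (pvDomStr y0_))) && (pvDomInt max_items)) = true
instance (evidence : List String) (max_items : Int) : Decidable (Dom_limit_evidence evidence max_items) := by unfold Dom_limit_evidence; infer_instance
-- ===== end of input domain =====

-- B replaces A's three membership-scanning comprehensions by one stable sort on a 0/1/2
-- priority key followed by a slice (objective: simpler).

-- ===== PORT A =====
def limit_evidence (evidence : List String) (max_items : Int) : List String :=
  if (evidence.length : Int) ≤ max_items then evidence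
  else
    let with_lines := evidence.filter (fun e =>
      PySem.Str.isIn ":" e && !(PySem.Str.endswith e ":0"))
    let file_paths := evidence.filter (fun e =>
      !(with_lines.contains e) &&
      ((PySem.Str.isIn "/" e || PySem.Str.isIn "\\" e)
        && !(PySem.Str.startswith e "Crew:") && !(PySem.Str.startswith e "Shared")
        && !(PySem.Str.startswith e "Downstream:")))
    let metadata := evidence.filter (fun e =>
      !(with_lines.contains e) && !(file_paths.contains e))
    PySem.List.slice (with_lines ++ file_paths ++ metadata) none (some max_items)

-- ===== PORT B =====
def pvPriority (e : String) : Int :=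
  if PySem.Str.isIn ":" e && !(PySem.Str.endswith e ":0") then 0
  else if (PySem.Str.isIn "/" e || PySem.Str.isIn "\\" e)
          && !(PySem.Str.startswith e "Crew:") && !(PySem.Str.startswith e "Shared")
          && !(PySem.Str.startswith e "Downstream:") then 1
  else 2

def limit_evidence_alt (evidence : List String) (max_items : Int) : List String :=
  if (evidence.length : Int) ≤ max_items then evidence
  else PySem.List.slice (PySem.List.sorted evidence pvPriority) none (some max_items)

-- ===== PRECONDITION & SPEC =====
def Spec_limit_evidence (evidence : List String) (max_items : Int) (out : List String) : Prop := out = limit_evidence_alt evidence max_items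
instance (evidence : List String) (max_items : Int) (out : List String) : Decidable (Spec_limit_evidence evidence max_items out) := by unfold Spec_limit_evidence; infer_instance

-- ===== CLAIM (what is proved, stated in full; the proofs are below) =====
def Claim_equal_limit_evidence : Prop := ∀ (evidence : List String) (max_items : Int), Dom_limit_evidence evidence max_items → Spec_limit_evidence evidence max_items (limit_evidence evidence max_items)

-- ===== LEMMAS AND PROOFS =====

theorem pvPriority_mem (e : String) : pvPriority e = 0 ∨ pvPriority e = 1 ∨ pvPriority e = 2 := by
  unfold pvPriority; split_ifs <;> simp

-- the three bucket tests of A, expressed against the if/elif priority key of B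
theorem pri_generic (a b : Bool) :
    a = decide ((if a = true then (0:Int) else if b = true then 1 else 2) = 0)
    ∧ (!a && b) = decide ((if a = true then (0:Int) else if b = true then 1 else 2) = 1)
    ∧ (!a && !(!a && b)) = decide ((if a = true then (0:Int) else if b = true then 1 else 2) = 2) := by
  rcases a <;> rcases b <;> simp

-- inserting x after every key-≤ element and before every key-> element lands between A and C
theorem insertBy_bucket {α : Type} (key : α → Int) (x : α) (A C : List α)
    (hA : ∀ a ∈ A, key a ≤ key x) (hC : ∀ c ∈ C, key x < key c) :
    PySem.List.insertBy (fun a b => decide (key a < key b)) x (A ++ C) = A ++ x :: C := by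
  induction A with
  | nil =>
    cases C with
    | nil => rfl
    | cons c cs =>
      have := hC c (by simp)
      simp [PySem.List.insertBy, this]
  | cons a as ih =>
    have h1 : ¬ key x < key a := not_lt.mpr (hA a (by simp))
    simp only [List.cons_append, PySem.List.insertBy, decide_eq_true_eq, if_neg h1]
    rw [ih (fun b hb => hA b (by simp [hb]))]

-- the stable sort on a 0/1/2-valued key is the concatenation of the three bucket filters
theorem sorted_three (xs : List String) :
    PySem.List.sorted xs pvPriority =
      xs.filter (fun e => decide (pvPriority e = 0))
        ++ xs.filter (fun e => decide (pvPriority e = 1))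
        ++ xs.filter (fun e => decide (pvPriority e = 2)) := by
  rw [PySem.List.sorted_eq_foldl_insertBy]
  induction xs using List.reverseRecOn with
  | nil => rfl
  | append_singleton xs x ih =>
    rw [List.foldl_append, List.foldl_cons, List.foldl_nil, ih]
    have hmem : ∀ (i : Int) (a : String),
        a ∈ xs.filter (fun e => decide (pvPriority e = i)) → pvPriority a = i := by
      intro i a ha
      simpa using (List.of_mem_filter ha)
    rcases pvPriority_mem x with h | h | h
    · rw [List.append_assoc]
      rw [insertBy_bucket pvPriority x
        (xs.filter (fun e => decide (pvPriority e = 0)))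
        ((xs.filter (fun e => decide (pvPriority e = 1)))
          ++ (xs.filter (fun e => decide (pvPriority e = 2))))
        (by intro a ha; rw [hmem 0 a ha, h])
        (by intro c hc; rcases List.mem_append.mp hc with hc | hc
            · rw [hmem 1 c hc, h]; norm_num
            · rw [hmem 2 c hc, h]; norm_num)]
      simp [List.filter_append, List.filter, h]
    · rw [insertBy_bucket pvPriority x
        ((xs.filter (fun e => decide (pvPriority e = 0)))
          ++ (xs.filter (fun e => decide (pvPriority e = 1))))
        (xs.filter (fun e => decide (pvPriority e = 2)))
        (by intro a ha; rcases List.mem_append.mp ha with ha | ha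
            · rw [hmem 0 a ha, h]; norm_num
            · rw [hmem 1 a ha, h])
        (by intro c hc; rw [hmem 2 c hc, h]; norm_num)]
      simp [List.filter_append, List.filter, h]
    · rw [PySem.List.insertBy_of_forall_not_before _ x _ (by
        intro y hy
        simp only [List.mem_append] at hy
        rcases hy with (hy | hy) | hy
        · rw [decide_eq_false_iff_not, hmem 0 y hy, h]; norm_num
        · rw [decide_eq_false_iff_not, hmem 1 y hy, h]; norm_num
        · rw [decide_eq_false_iff_not, hmem 2 y hy, h]; norm_num)]
      simp [List.filter_append, List.filter, h]

-- membership in a filtered sublist, for elements of the base list, is the predicate itself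
theorem contains_filter_eq {p : String → Bool} {xs : List String} {e : String} (he : e ∈ xs) :
    (xs.filter p).contains e = p e := by
  rcases h : p e with _ | _ <;>
    simp [List.mem_filter, he, h]

-- ===== VERDICT (by name: the statement is the Claim_ definition above) =====
theorem limit_evidence_spec : Claim_equal_limit_evidence := by
  intro evidence max_items _
  unfold Spec_limit_evidence
  simp only [limit_evidence, limit_evidence_alt]
  split_ifs with hlen
  · rfl
  · rw [sorted_three]
    have h0 : evidence.filter (fun e =>
        PySem.Str.isIn ":" e && !(PySem.Str.endswith e ":0"))
        = evidence.filter (fun e => decide (pvPriority e = 0)) :=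
      List.filter_congr (fun e _ => by
        simp only [pvPriority]; exact (pri_generic _ _).1)
    have h1 : evidence.filter (fun e =>
        !((evidence.filter (fun e' =>
            PySem.Str.isIn ":" e' && !(PySem.Str.endswith e' ":0"))).contains e)
        && ((PySem.Str.isIn "/" e || PySem.Str.isIn "\\" e)
            && !(PySem.Str.startswith e "Crew:") && !(PySem.Str.startswith e "Shared")
            && !(PySem.Str.startswith e "Downstream:")))
        = evidence.filter (fun e => decide (pvPriority e = 1)) := by
      refine List.filter_congr (fun e he => ?_)
      rw [contains_filter_eq he]
      simp only [pvPriority]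
      exact (pri_generic _ _).2.1
    have h2 : evidence.filter (fun e =>
        !((evidence.filter (fun e' =>
            PySem.Str.isIn ":" e' && !(PySem.Str.endswith e' ":0"))).contains e)
        && !((evidence.filter (fun e' =>
            !((evidence.filter (fun e'' =>
                PySem.Str.isIn ":" e'' && !(PySem.Str.endswith e'' ":0"))).contains e')
            && ((PySem.Str.isIn "/" e' || PySem.Str.isIn "\\" e')
                && !(PySem.Str.startswith e' "Crew:") && !(PySem.Str.startswith e' "Shared")
                && !(PySem.Str.startswith e' "Downstream:")))).contains e))
        = evidence.filter (fun e => decide (pvPriority e = 2)) := by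
      refine List.filter_congr (fun e he => ?_)
      rw [contains_filter_eq he, contains_filter_eq he, contains_filter_eq he]
      simp only [pvPriority]
      exact (pri_generic _ _).2.2
    rw [← h0, ← h1, ← h2]
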